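-- pv_equiv track=rewrite | github.com/lohraspco/data-science | optimization/python/component_importance_py/Centrality.py | __minNonZeroDictKey
-- ===== SOURCE A (Python) =====
-- def __minNonZeroDictKey(d):
--     # {x: y for x, y in net1.mfmc.items() if y != 0}
--     min_val = None
--     result = None
--     for k, v in d.items():
--         if v and (min_val is None or v < min_val):
--             min_val = v
--             result = k
--     return result
-- ===== SOURCE B (Python) =====
-- def __minNonZeroDictKey(d):
--     # Stage 1: keep the nonzero items; Stage 2: stable sort by value;
--     # the head of the sorted list is the first item attaining the minimum
--     # (stability reproduces A's strict-< first-wins tie-breaking).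
--     nz = sorted((kv for kv in d.items() if kv[1]), key=lambda kv: kv[1])
--     return nz[0][0] if nz else None
-- ===== Notes on version B (the rewrite author's own statement) =====
-- stated objective: alternative
-- what changed: A's single-pass running-minimum loop is replaced by filter-then-stable-sort-by-value and taking the head of the sorted list; stability makes the head the first item with the minimal value, matching A's strict-< first-wins rule.
import Mathlib
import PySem

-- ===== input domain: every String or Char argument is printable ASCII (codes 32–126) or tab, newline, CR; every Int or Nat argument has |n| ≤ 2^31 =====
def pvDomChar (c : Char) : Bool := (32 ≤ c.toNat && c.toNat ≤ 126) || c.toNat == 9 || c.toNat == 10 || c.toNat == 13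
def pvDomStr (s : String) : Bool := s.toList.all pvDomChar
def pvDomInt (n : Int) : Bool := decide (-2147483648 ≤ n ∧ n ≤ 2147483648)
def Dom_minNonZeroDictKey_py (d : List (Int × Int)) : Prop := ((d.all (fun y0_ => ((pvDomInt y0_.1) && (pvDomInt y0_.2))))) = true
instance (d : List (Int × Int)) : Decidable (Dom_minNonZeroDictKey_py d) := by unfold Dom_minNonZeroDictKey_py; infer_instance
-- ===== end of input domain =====

-- B replaces A's single-pass running-minimum loop by filter-then-stable-sort-by-value and
-- taking the head of the sorted list: a different algorithm (O(n log n)), not faster.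


-- ===== PORT A =====
-- literal port of A's loop: state (min_val, result), `if v and (min_val is None or v < min_val)`
def minNonZeroDictKey_py (d : List (Int × Int)) : Option Int :=
  (d.foldl
    (fun (st : Option Int × Option Int) kv =>
      if kv.2 != 0 && (st.1 == none || decide (kv.2 < st.1.getD 0))
      then (some kv.2, some kv.1)
      else st)
    (none, none)).2

-- ===== PORT B =====
-- nz = sorted((kv for kv in d.items() if kv[1]), key=lambda kv: kv[1]); nz[0][0] if nz else None
def minNonZeroDictKey_py_alt (d : List (Int × Int)) : Option Int :=
  match PySem.List.sorted (d.filter (fun kv => kv.2 != 0)) (fun kv => kv.2) false with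
  | [] => none
  | kv :: _ => some kv.1

-- ===== PRECONDITION & SPEC =====
def Spec_minNonZeroDictKey_py (d : List (Int × Int)) (out : Option Int) : Prop := out = minNonZeroDictKey_py_alt d
instance (d : List (Int × Int)) (out : Option Int) : Decidable (Spec_minNonZeroDictKey_py d out) := by unfold Spec_minNonZeroDictKey_py; infer_instance

-- ===== CLAIM (what is proved, stated in full; the proofs are below) =====
def Claim_equal_minNonZeroDictKey_py : Prop := ∀ (d : List (Int × Int)), Dom_minNonZeroDictKey_py d → Spec_minNonZeroDictKey_py d (minNonZeroDictKey_py d)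

-- ===== LEMMAS AND PROOFS =====

-- the common meeting point: the first pair attaining the minimal value
def firstMinStep (st : Option (Int × Int)) (kv : Int × Int) : Option (Int × Int) :=
  match st with
  | none => some kv
  | some m => if kv.2 < m.2 then some kv else some m

-- A's step, with the zero test pulled outside
theorem stepA_split (st : Option Int × Option Int) (kv : Int × Int) :
    (if kv.2 != 0 && (st.1 == none || decide (kv.2 < st.1.getD 0))
     then ((some kv.2, some kv.1) : Option Int × Option Int) else st)
    = if kv.2 != 0 then
        (if st.1 == none || decide (kv.2 < st.1.getD 0) then (some kv.2, some kv.1) else st)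
      else st := by
  by_cases h : kv.2 = 0 <;> simp [h]

-- A's fold over the filtered list computes the key of the first minimal pair
theorem foldA_eq_firstMin (f : List (Int × Int)) (st : Option (Int × Int)) :
    (f.foldl
      (fun (st : Option Int × Option Int) kv =>
        if st.1 == none || decide (kv.2 < st.1.getD 0) then (some kv.2, some kv.1) else st)
      (st.map Prod.snd, st.map Prod.fst)).2
    = (f.foldl firstMinStep st).map Prod.fst := by
  induction f generalizing st with
  | nil => rfl
  | cons p t ih =>
    cases st with
    | none =>
      simpa [firstMinStep] using ih (some p)
    | some m =>
      by_cases h : p.2 < m.2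
      · simpa [firstMinStep, h] using ih (some p)
      · simpa [firstMinStep, h] using ih (some m)

-- head of insertBy, in firstMinStep form
theorem head?_insertBy (x : Int × Int) (ys : List (Int × Int)) :
    (PySem.List.insertBy (fun a b => decide ((a : Int × Int).2 < b.2)) x ys).head?
    = firstMinStep ys.head? x := by
  cases ys with
  | nil => rfl
  | cons y t =>
    by_cases h : x.2 < y.2 <;> simp [PySem.List.insertBy, firstMinStep, h]

-- head of the insertion-sort fold is the first minimal pair
theorem head?_foldl_insertBy (f : List (Int × Int)) (acc : List (Int × Int)) :
    (f.foldl
      (fun a x => PySem.List.insertBy (fun a b => decide ((a : Int × Int).2 < b.2)) x a)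
      acc).head?
    = f.foldl firstMinStep acc.head? := by
  induction f generalizing acc with
  | nil => rfl
  | cons p t ih =>
    simp only [List.foldl_cons, ih, head?_insertBy]

-- ===== VERDICT (by name: the statement is the Claim_ definition above) =====
theorem minNonZeroDictKey_py_spec : Claim_equal_minNonZeroDictKey_py := by
  intro d _
  unfold Spec_minNonZeroDictKey_py minNonZeroDictKey_py minNonZeroDictKey_py_alt
  have h1 : d.foldl
      (fun (st : Option Int × Option Int) kv =>
        if kv.2 != 0 && (st.1 == none || decide (kv.2 < st.1.getD 0))
        then (some kv.2, some kv.1) else st) (none, none)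
      = (d.filter (fun kv => kv.2 != 0)).foldl
          (fun (st : Option Int × Option Int) kv =>
            if st.1 == none || decide (kv.2 < st.1.getD 0) then (some kv.2, some kv.1) else st)
          (none, none) := by
    rw [← PySem.List.foldl_if_eq_foldl_filter]
    apply PySem.List.foldl_congr_mem
    intro st kv _
    exact stepA_split st kv
  rw [h1]
  have hA := foldA_eq_firstMin (d.filter (fun kv => kv.2 != 0)) none
  simp only [Option.map_none] at hA
  rw [hA]
  rw [PySem.List.sorted_eq_foldl_insertBy]
  have hB := head?_foldl_insertBy (d.filter (fun kv => kv.2 != 0)) []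
  simp only [List.head?_nil] at hB
  cases hh : ((d.filter (fun kv => kv.2 != 0)).foldl
      (fun a x => PySem.List.insertBy (fun a b => decide ((a : Int × Int).2 < b.2)) x a) []) with
  | nil =>
    rw [hh] at hB
    simp only [List.head?_nil] at hB
    rw [← hB]
    rfl
  | cons kv t =>
    rw [hh] at hB
    simp only [List.head?_cons] at hB
    rw [← hB]
    rfl
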